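-- pv_equiv track=rewrite | github.com/LittleCrazyDog/LeetCode | 777-swap-adjacent-in-lr-string/777-swap-adjacent-in-lr-string.py | canTransform
-- ===== SOURCE A (Python) =====
-- def canTransform(start: str, end: str) -> bool:
--     # L, R orders must be the same
--     if start.replace('X', '') != end.replace('X', ''):
--         return False
--
--     n = len(start)
--     startL = [i for i in range(n) if start[i] == 'L']
--     endL = [i for i in range(n) if end[i] == 'L']
--     startR = [i for i in range(n) if start[i] == 'R']
--     endR = [i for i in range(n) if end[i] == 'R']
--
--     for i, j in zip(startL, endL):
--         if i < j:
--             return False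
--
--     for i, j in zip(startR, endR):
--         if i > j:
--             return False
--
--     return True
-- ===== SOURCE B (Python) =====
-- def canTransform(start: str, end: str) -> bool:
--     # Same guard as the original: the sequence of non-X characters must match.
--     if start.replace('X', '') != end.replace('X', ''):
--         return False
--     # Single two-pointer pass instead of building four index lists:
--     # align the k-th non-X characters and check the movement direction.
--     i, j = 0, 0
--     n, m = len(start), len(end)
--     while True:
--         while i < n and start[i] == 'X':
--             i += 1
--         while j < m and end[j] == 'X':
--             j += 1
--         if i == n or j == m:
--             return True
--         c = start[i]  # equals end[j], thanks to the guard
--         if c == 'L' and i < j: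
--             return False
--         if c == 'R' and i > j:
--             return False
--         i += 1
--         j += 1
-- ===== Notes on version B (the rewrite author's own statement) =====
-- stated objective: idiomatic
-- what changed: Replaces the four position-list comprehensions plus two zip loops by a single two-pointer pass that aligns the k-th non-X characters of start and end and checks the L/R movement direction in place.
-- outside the precondition, e.g. on canTransform('LX', 'XXL'): A returns True, B returns False
import Mathlib
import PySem

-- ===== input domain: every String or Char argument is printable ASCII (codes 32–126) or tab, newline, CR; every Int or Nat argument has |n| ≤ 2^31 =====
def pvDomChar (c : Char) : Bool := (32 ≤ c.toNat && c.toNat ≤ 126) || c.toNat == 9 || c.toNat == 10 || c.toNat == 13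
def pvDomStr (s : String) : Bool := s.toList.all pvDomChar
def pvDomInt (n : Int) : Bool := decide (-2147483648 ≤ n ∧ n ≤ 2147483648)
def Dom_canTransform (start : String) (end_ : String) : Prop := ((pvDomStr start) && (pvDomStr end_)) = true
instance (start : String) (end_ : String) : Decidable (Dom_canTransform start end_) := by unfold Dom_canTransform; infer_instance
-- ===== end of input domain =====

-- B replaces A's four position-list comprehensions and two zip loops by one two-pointer
-- pass over the aligned non-X characters (objective: a more idiomatic single pass).

-- ===== PORT A =====
def canTransform (start : String) (end_ : String) : Bool :=
  if PySem.Str.replace start "X" "" ≠ PySem.Str.replace end_ "X" "" then false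
  else
    let n := start.toList.length
    let startL := (List.range n).filter (fun i => start.toList.getD i ' ' == 'L')
    let endL := (List.range n).filter (fun i => end_.toList.getD i ' ' == 'L')
    let startR := (List.range n).filter (fun i => start.toList.getD i ' ' == 'R')
    let endR := (List.range n).filter (fun i => end_.toList.getD i ' ' == 'R')
    if (startL.zip endL).any (fun p => p.1 < p.2) then false
    else if (startR.zip endR).any (fun p => p.1 > p.2) then false
    else true

-- ===== PORT B =====
-- Source B's inner `while j < m and end[j] == 'X': j += 1` loop: skip the 'X' run, advancing j
def skipX : List Char → Nat → List Char × Nat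
  | [], j => ([], j)
  | d :: e', j => if d == 'X' then skipX e' (j + 1) else (d :: e', j)

-- Source B's two-pointer walk: i runs over start (head of s), j over end (via skipX);
-- at each aligned non-X character check the L/R movement direction
def walkLR : List Char → List Char → Nat → Nat → Bool
  | [], _, _, _ => true
  | c :: s', e, i, j =>
    if c == 'X' then walkLR s' e (i + 1) j
    else
      match skipX e j with
      | ([], _) => true
      | (_ :: e', j') =>
        if c == 'L' && i < j' then false
        else if c == 'R' && i > j' then false
        else walkLR s' e' (i + 1) (j' + 1)

def canTransform_alt (start : String) (end_ : String) : Bool :=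
  if PySem.Str.replace start "X" "" ≠ PySem.Str.replace end_ "X" "" then false
  else walkLR start.toList end_.toList 0 0

-- ===== PRECONDITION & SPEC =====
-- Pre_ excludes only the length-mismatched inputs whose non-X character sequences coincide:
-- there A either raises IndexError (end shorter than start) or returns a zip-truncated verdict
-- that is an accident of reading only the first len(start) characters of end; transformability
-- is only specified for equal-length strings.
def Pre_canTransform (start : String) (end_ : String) : Prop :=
  start.toList.length = end_.toList.length ∨
    start.toList.filter (· != 'X') ≠ end_.toList.filter (· != 'X')
instance (start : String) (end_ : String) : Decidable (Pre_canTransform start end_) := by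
  unfold Pre_canTransform; infer_instance

def pvWitness_canTransform : String × String := ("RXXLX", "XRLXX")

def Spec_canTransform (start : String) (end_ : String) (out : Bool) : Prop :=
  out = canTransform_alt start end_
instance (start : String) (end_ : String) (out : Bool) : Decidable (Spec_canTransform start end_ out) := by
  unfold Spec_canTransform; infer_instance

-- ===== CLAIM (what is proved, stated in full; the proofs are below) =====
def Claim_equal_canTransform : Prop := ∀ (start : String) (end_ : String),
  Dom_canTransform start end_ → Pre_canTransform start end_ →
    Spec_canTransform start end_ (canTransform start end_)

-- ===== LEMMAS AND PROOFS =====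

/-- positions (0-based) of character `c` in a character list -/
def occ (c : Char) : List Char → List Nat
  | [] => []
  | a :: s => if a == c then 0 :: (occ c s).map (· + 1) else (occ c s).map (· + 1)

theorem replace_go_eq_filter (fuel : Nat) (l acc : List Char) (h : l.length ≤ fuel) :
    PySem.Chars.replace.go ['X'] [] fuel l acc = acc.reverse ++ l.filter (· != 'X') := by
  induction fuel generalizing l acc with
  | zero =>
    have : l = [] := List.length_eq_zero_iff.mp (Nat.le_zero.mp h)
    subst this; simp [PySem.Chars.replace.go]
  | succ fuel ih =>
    cases l with
    | nil => simp [PySem.Chars.replace.go]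
    | cons c t =>
      rw [PySem.Chars.replace.go]
      by_cases hc : c = 'X'
      · subst hc
        have hpre : List.isPrefixOf ['X'] ('X' :: t) = true := by simp [List.isPrefixOf]
        rw [if_pos hpre]
        simp only [List.length_cons, List.length_nil, Nat.zero_add, List.drop_succ_cons,
          List.drop_zero, List.reverse_nil, List.nil_append]
        rw [ih t acc (by simpa using h)]
        simp
      · have hne : ('X' == c) = false := beq_eq_false_iff_ne.mpr (Ne.symm hc)
        have hpre : List.isPrefixOf ['X'] (c :: t) = false := by
          simp [List.isPrefixOf, hne]
        rw [if_neg (by simp [hpre])]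
        rw [ih t (c :: acc) (by simpa using h)]
        simp [hc]

theorem replace_X_eq_filter (l : List Char) :
    PySem.Chars.replace l ['X'] [] = l.filter (· != 'X') := by
  rw [PySem.Chars.replace]
  simp only [List.isEmpty_cons, if_neg Bool.false_ne_true]
  simpa using replace_go_eq_filter l.length l [] le_rfl

theorem occ_skipX (c : Char) (hc : c ≠ 'X') (e : List Char) (j : Nat) :
    (occ c (skipX e j).1).map (· + (skipX e j).2) = (occ c e).map (· + j) := by
  induction e generalizing j with
  | nil => simp [skipX]
  | cons d e' ih =>
    by_cases hd : d = 'X'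
    · subst hd
      have hne : ('X' == c) = false := beq_eq_false_iff_ne.mpr (Ne.symm hc)
      rw [show skipX ('X' :: e') j = skipX e' (j + 1) by simp [skipX]]
      rw [ih (j + 1)]
      simp only [occ, hne, Bool.false_eq_true, if_false]
      rw [List.map_map]
      refine List.map_congr_left fun a _ => ?_
      simp only [Function.comp_apply]
      omega
    · simp [skipX, hd]

theorem skipX_filter (e : List Char) (j : Nat) :
    ((skipX e j).1).filter (· != 'X') = e.filter (· != 'X') := by
  induction e generalizing j with
  | nil => simp [skipX]
  | cons d e' ih =>
    by_cases hd : d = 'X'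
    · subst hd; simpa [skipX] using ih (j + 1)
    · simp [skipX, hd]

theorem skipX_head (e : List Char) (j : Nat) (d : Char) (e2 : List Char)
    (h : (skipX e j).1 = d :: e2) : (d == 'X') = false := by
  induction e generalizing j with
  | nil => simp [skipX] at h
  | cons a e' ih =>
    by_cases ha : a = 'X'
    · subst ha; exact ih (j + 1) (by simpa [skipX] using h)
    · simp [skipX, ha] at h
      simp [h.1.symm, ha]

theorem shift1 (xs : List Nat) (i : Nat) :
    (xs.map (· + 1)).map (· + i) = xs.map (· + (i + 1)) := by
  rw [List.map_map]
  exact List.map_congr_left fun a _ => by simp only [Function.comp_apply]; omega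

theorem walkLR_eq_occ (s : List Char) : ∀ (e : List Char) (i j : Nat),
    s.filter (· != 'X') = e.filter (· != 'X') →
    walkLR s e i j =
      ((((occ 'L' s).map (· + i)).zip ((occ 'L' e).map (· + j))).all
          (fun p => !decide (p.1 < p.2)) &&
       (((occ 'R' s).map (· + i)).zip ((occ 'R' e).map (· + j))).all
          (fun p => !decide (p.1 > p.2))) := by
  induction s with
  | nil => intro e i j _; simp [walkLR, occ]
  | cons c s' ih =>
    intro e i j h
    by_cases hc : c = 'X'
    · subst hc
      have h' : s'.filter (· != 'X') = e.filter (· != 'X') := by simpa using h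
      rw [show walkLR ('X' :: s') e i j = walkLR s' e (i + 1) j by simp [walkLR]]
      rw [ih e (i + 1) j h']
      have hL : ('X' == 'L') = false := by decide
      have hR : ('X' == 'R') = false := by decide
      simp only [occ, hL, hR, Bool.false_eq_true, if_false, shift1]
    · rcases he : skipX e j with ⟨e'', j'⟩
      have hfil : e''.filter (· != 'X') = e.filter (· != 'X') := by
        simpa [he] using skipX_filter e j
      have hoL := occ_skipX 'L' (by decide) e j
      have hoR := occ_skipX 'R' (by decide) e j
      rw [he] at hoL hoR
      simp only at hoL hoR
      rw [← hoL, ← hoR]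
      cases e'' with
      | nil =>
        exfalso
        rw [← hfil] at h
        simp [hc] at h
      | cons d e2 =>
        have hd : (d == 'X') = false := skipX_head e j d e2 (by simp [he])
        have hcb : (c == 'X') = false := beq_eq_false_iff_ne.mpr hc
        have hcd : c = d ∧ s'.filter (· != 'X') = e2.filter (· != 'X') := by
          rw [← hfil] at h
          have hd' : d ≠ 'X' := by simpa using hd
          simp only [List.filter_cons, bne_iff_ne] at h
          rw [if_pos hc, if_pos hd'] at h
          exact List.cons_eq_cons.mp h
        obtain ⟨rfl, h2⟩ := hcd
        rw [show walkLR (c :: s') e i j =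
              (if c == 'L' && decide (i < j') then false
               else if c == 'R' && decide (i > j') then false
               else walkLR s' e2 (i + 1) (j' + 1)) by
          simp [walkLR, hcb, he]]
        rw [ih e2 (i + 1) (j' + 1) h2]
        by_cases hcL : c = 'L'
        · subst hcL
          have hLR : ('L' == 'R') = false := by decide
          simp only [occ, beq_self_eq_true, if_true, hLR, Bool.false_eq_true, if_false,
            List.map_cons, shift1, List.zip_cons_cons, List.all_cons, Nat.zero_add, Bool.true_and]
          by_cases hij : i < j' <;> simp [hij]
        · by_cases hcR : c = 'R'
          · subst hcR
            have hRL : ('R' == 'L') = false := by decide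
            simp only [occ, beq_self_eq_true, if_true, hRL, Bool.false_eq_true, if_false,
              List.map_cons, shift1, List.zip_cons_cons, List.all_cons, Nat.zero_add, Bool.true_and]
            by_cases hij : i > j' <;> simp [hij]
          · have hL : (c == 'L') = false := beq_eq_false_iff_ne.mpr hcL
            have hR : (c == 'R') = false := beq_eq_false_iff_ne.mpr hcR
            simp only [occ, hL, hR, Bool.false_eq_true, if_false, shift1, Bool.false_and]

theorem rangeFilter_eq_occ (c : Char) (l : List Char) :
    (List.range l.length).filter (fun i => l.getD i ' ' == c) = occ c l := by
  induction l with
  | nil => simp [occ]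
  | cons a t ih =>
    rw [List.length_cons, List.range_succ_eq_map, List.filter_cons]
    simp only [List.getD_cons_zero, List.filter_map, Function.comp_def, List.getD_cons_succ,
      occ, Nat.succ_eq_add_one]
    simp only [List.getD_eq_getElem?_getD] at ih
    by_cases h : a == c <;> simp [h] <;> exact congrArg (List.map Nat.succ) ih

-- ===== VERDICT (by name: the statement is the Claim_ definition above) =====
theorem canTransform_spec : Claim_equal_canTransform := by
  unfold Claim_equal_canTransform
  intro start end_ _ hpre
  unfold Pre_canTransform at hpre
  unfold Spec_canTransform canTransform canTransform_alt
  by_cases hg : PySem.Str.replace start "X" "" = PySem.Str.replace end_ "X" ""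
  case neg => simp [hg]
  case pos =>
    have hfil : start.toList.filter (· != 'X') = end_.toList.filter (· != 'X') := by
      have h2 := congrArg String.toList hg
      rw [PySem.Str.toList_replace, PySem.Str.toList_replace] at h2
      have hx : ("X" : String).toList = ['X'] := rfl
      have he : ("" : String).toList = [] := rfl
      rw [hx, he, replace_X_eq_filter, replace_X_eq_filter] at h2
      exact h2
    have hlen : start.toList.length = end_.toList.length := by
      rcases hpre with h | h
      · exact h
      · exact absurd hfil h
    have hEL : (List.range start.toList.length).filter
        (fun i => end_.toList.getD i ' ' == 'L') = occ 'L' end_.toList := by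
      rw [hlen]; exact rangeFilter_eq_occ 'L' end_.toList
    have hER : (List.range start.toList.length).filter
        (fun i => end_.toList.getD i ' ' == 'R') = occ 'R' end_.toList := by
      rw [hlen]; exact rangeFilter_eq_occ 'R' end_.toList
    simp only [hg, ne_eq, not_true_eq_false, if_false]
    rw [rangeFilter_eq_occ 'L' start.toList, rangeFilter_eq_occ 'R' start.toList, hEL, hER]
    rw [walkLR_eq_occ start.toList end_.toList 0 0 hfil]
    simp only [Nat.add_zero, List.map_id']
    rw [← List.not_any_eq_all_not, ← List.not_any_eq_all_not]
    cases hA : ((occ 'L' start.toList).zip (occ 'L' end_.toList)).any (fun p => decide (p.1 < p.2)) <;>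
      cases hB : ((occ 'R' start.toList).zip (occ 'R' end_.toList)).any (fun p => decide (p.1 > p.2)) <;>
        simp_all
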